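-- pv_equiv track=rewrite | github.com/Poolantir/simulation-controller | backend/behavioral_model.py | conditions_from_frontend_payload
-- ===== SOURCE A (Python) =====
-- from typing import Dict, List, Sequence, Tuple
--
-- def empty_conditions_for_types(toilet_types: Sequence[str]) -> Dict[int, str]:
--     """Convenience: build a 'everything Clean, nonexistent locked' map."""
--     out: Dict[int, str] = {}
--     for i, t in enumerate(toilet_types):
--         out[i] = "Non-Existent" if str(t).lower() == "nonexistent" else "Clean"
--     return out
--
-- def conditions_from_frontend_payload(
--     toilet_types: Sequence[str],
--     restroom_conditions: Dict | None,
-- ) -> Dict[int, str]: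
--     """
--     Convert the frontend `{stalls:[{id,condition}], urinals:[{id,condition}]}`
--     shape into a 0-indexed map aligned with `toilet_types`.
--     """
--     if not restroom_conditions:
--         return empty_conditions_for_types(toilet_types)
--     out = empty_conditions_for_types(toilet_types)
--     for bucket in ("stalls", "urinals"):
--         entries = restroom_conditions.get(bucket) or []
--         for e in entries:
--             try:
--                 idx = int(e["id"]) - 1
--             except (KeyError, TypeError, ValueError):
--                 continue
--             if 0 <= idx < len(toilet_types):
--                 cond = e.get("condition", "Clean")
--                 # Non-existent fixtures stay locked regardless of payload.
--                 if str(toilet_types[idx]).lower() == "nonexistent":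
--                     out[idx] = "Non-Existent"
--                 else:
--                     out[idx] = cond
--     return out
-- ===== SOURCE B (Python) =====
-- def conditions_from_frontend_payload(toilet_types, restroom_conditions):
--     # Flatten the payload once (stalls then urinals), then answer each index by
--     # scanning that flat list BACKWARDS for the most recent matching entry —
--     # no defaults dict, no mutation, last-wins falls out of the reverse scan.
--     entries = []
--     if restroom_conditions:
--         for bucket in ("stalls", "urinals"):
--             entries.extend(restroom_conditions.get(bucket) or [])
--
--     def latest_condition(i):
--         for e in reversed(entries):
--             try:
--                 idx = int(e["id"]) - 1
--             except (KeyError, TypeError, ValueError):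
--                 continue
--             if idx == i:
--                 return e.get("condition", "Clean")
--         return "Clean"
--
--     return {
--         i: ("Non-Existent" if str(t).lower() == "nonexistent" else latest_condition(i))
--         for i, t in enumerate(toilet_types)
--     }
-- ===== Notes on version B (the rewrite author's own statement) =====
-- stated objective: alternative
-- what changed: Instead of A's build-default-dict-then-mutate-with-bounds-checked-writes, B keeps no condition map at all: it flattens the payload into one list and answers each index of toilet_types by a backwards scan of that list for the most recent matching id (reverse-first-match replaces dict overwriting); the bounds check disappears since idx==i implies in range.
import Mathlib
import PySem

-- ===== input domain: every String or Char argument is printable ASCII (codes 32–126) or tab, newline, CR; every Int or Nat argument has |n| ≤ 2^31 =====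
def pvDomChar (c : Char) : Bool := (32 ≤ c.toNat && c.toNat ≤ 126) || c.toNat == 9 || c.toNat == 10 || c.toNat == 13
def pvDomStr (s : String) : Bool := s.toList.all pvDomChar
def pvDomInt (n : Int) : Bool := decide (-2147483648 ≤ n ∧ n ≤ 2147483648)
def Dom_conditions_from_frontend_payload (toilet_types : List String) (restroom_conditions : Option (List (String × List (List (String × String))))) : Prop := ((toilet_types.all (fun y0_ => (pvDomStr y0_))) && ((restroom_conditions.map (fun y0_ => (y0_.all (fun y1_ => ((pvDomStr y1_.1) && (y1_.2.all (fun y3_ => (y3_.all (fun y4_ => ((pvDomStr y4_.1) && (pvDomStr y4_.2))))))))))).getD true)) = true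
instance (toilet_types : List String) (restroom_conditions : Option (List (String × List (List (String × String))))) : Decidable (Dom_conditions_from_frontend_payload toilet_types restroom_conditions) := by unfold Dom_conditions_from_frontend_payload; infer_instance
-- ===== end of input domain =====

-- B drops A's default-map-then-mutate strategy: it flattens the payload once and answers each
-- index by a backwards scan for the most recent matching id (alternative decomposition; return
-- values only, no mutation involved).

-- ===== PORT A =====
-- port of empty_conditions_for_types
def pvEmptyConds (toilet_types : List String) : PySem.Dict Int String :=
  (PySem.List.enumerate toilet_types 0).foldl
    (fun out p =>
      out.insert p.1 (if PySem.Str.lower p.2 == "nonexistent" then "Non-Existent" else "Clean"))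
    PySem.Dict.empty

-- body of A's inner loop over one payload entry e
def pvAStep (toilet_types : List String) (out : PySem.Dict Int String)
    (e : List (String × String)) : PySem.Dict Int String :=
  match (PySem.Dict.mk e).get? "id" with
  | none => out                                   -- KeyError: continue
  | some s =>
    match PySem.Int.ofStr? s with
    | none => out                                 -- ValueError: continue
    | some n =>
      let idx := n - 1
      if 0 ≤ idx ∧ idx < (toilet_types.length : Int) then
        let cond := ((PySem.Dict.mk e).get? "condition").getD "Clean"
        if PySem.Str.lower (PySem.List.pyGetD toilet_types idx "") == "nonexistent" then
          out.insert idx "Non-Existent"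
        else
          out.insert idx cond
      else out

def conditions_from_frontend_payload (toilet_types : List String) (restroom_conditions : Option (List (String × List (List (String × String))))) : List (Int × String) :=
  match restroom_conditions with
  | none => (pvEmptyConds toilet_types).items
  | some rc =>
    if rc = [] then (pvEmptyConds toilet_types).items
    else
      (["stalls", "urinals"].foldl
        (fun out bucket =>
          (((PySem.Dict.mk rc).get? bucket).getD []).foldl (pvAStep toilet_types) out)
        (pvEmptyConds toilet_types)).items

-- ===== PORT B =====
-- int(e["id"]) - 1, with KeyError/ValueError turned into none (the 'continue' cases)
def pvParseId? (e : List (String × String)) : Option Int :=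
  match (PySem.Dict.mk e).get? "id" with
  | none => none
  | some s =>
    match PySem.Int.ofStr? s with
    | none => none
    | some n => some (n - 1)

-- B's latest_condition(i): the for-loop over reversed(entries) with early return
def pvLatestCond (i : Int) : List (List (String × String)) → String
  | [] => "Clean"
  | e :: rest =>
    match pvParseId? e with
    | none => pvLatestCond i rest
    | some idx =>
      if idx == i then ((PySem.Dict.mk e).get? "condition").getD "Clean"
      else pvLatestCond i rest

def conditions_from_frontend_payload_alt (toilet_types : List String) (restroom_conditions : Option (List (String × List (List (String × String))))) : List (Int × String) :=
  let entries : List (List (String × String)) :=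
    match restroom_conditions with
    | none => []
    | some rc =>
      if rc = [] then []
      else ["stalls", "urinals"].foldl
        (fun es bucket => es ++ (((PySem.Dict.mk rc).get? bucket).getD [])) []
  (PySem.List.enumerate toilet_types 0).map
    (fun p =>
      (p.1, if PySem.Str.lower p.2 == "nonexistent" then "Non-Existent"
            else pvLatestCond p.1 entries.reverse))

-- ===== PRECONDITION & SPEC =====
def Spec_conditions_from_frontend_payload (toilet_types : List String) (restroom_conditions : Option (List (String × List (List (String × String))))) (out : List (Int × String)) : Prop := out = conditions_from_frontend_payload_alt toilet_types restroom_conditions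
instance (toilet_types : List String) (restroom_conditions : Option (List (String × List (List (String × String))))) (out : List (Int × String)) : Decidable (Spec_conditions_from_frontend_payload toilet_types restroom_conditions out) := by unfold Spec_conditions_from_frontend_payload; infer_instance

-- ===== CLAIM (what is proved, stated in full; the proofs are below) =====
def Claim_equal_conditions_from_frontend_payload : Prop := ∀ (toilet_types : List String) (restroom_conditions : Option (List (String × List (List (String × String))))), Dom_conditions_from_frontend_payload toilet_types restroom_conditions → Spec_conditions_from_frontend_payload toilet_types restroom_conditions (conditions_from_frontend_payload toilet_types restroom_conditions)

-- ===== LEMMAS AND PROOFS =====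

-- proof-side dict of payload overrides (bounds-checked last-wins writes, like A but without defaults)
def pvBStep (toilet_types : List String) (ov : PySem.Dict Int String)
    (e : List (String × String)) : PySem.Dict Int String :=
  match pvParseId? e with
  | none => ov
  | some idx =>
    if 0 ≤ idx ∧ idx < (toilet_types.length : Int) then
      ov.insert idx (((PySem.Dict.mk e).get? "condition").getD "Clean")
    else ov

-- B's per-index value, as a function of the overrides dict
def pvVal (ov : PySem.Dict Int String) (p : Int × String) : Int × String :=
  (p.1, if PySem.Str.lower p.2 == "nonexistent" then "Non-Existent" else ov.getD p.1 "Clean")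

-- the loop invariant: A's dict lists exactly the final map for the current overrides
def pvInv (toilet_types : List String) (d : PySem.Dict Int String)
    (ov : PySem.Dict Int String) : Prop :=
  d.items = (PySem.List.enumerate toilet_types 0).map (pvVal ov)

theorem pvEnum_fst_nodup (toilet_types : List String) :
    ((PySem.List.enumerate toilet_types 0).map Prod.fst).Nodup := by
  have hp := PySem.List.pairwise_lt_enumerate (xs := toilet_types) (s := 0)
  exact (List.pairwise_map.mpr hp).imp (fun hlt => ne_of_lt hlt)

theorem pvInv_base (toilet_types : List String) :
    pvInv toilet_types (pvEmptyConds toilet_types) PySem.Dict.empty := by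
  unfold pvInv pvEmptyConds
  rw [PySem.Dict.items_foldl_insert_fresh (PySem.List.enumerate toilet_types 0) Prod.fst
        (fun p => if PySem.Str.lower p.2 == "nonexistent" then "Non-Existent" else "Clean")
        PySem.Dict.empty
        (fun a _ => PySem.Dict.contains_empty _) (pvEnum_fst_nodup toilet_types)]
  simp [pvVal, PySem.Dict.empty, PySem.Dict.getD, PySem.Dict.get?]

theorem pvInv_insert (toilet_types : List String) (d ov : PySem.Dict Int String)
    (k : Nat) (hk : k < toilet_types.length) (cond : String)
    (h : pvInv toilet_types d ov) :
    pvInv toilet_types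
      (d.insert (k : Int)
        (if PySem.Str.lower toilet_types[k] == "nonexistent" then "Non-Existent" else cond))
      (ov.insert (k : Int) cond) := by
  unfold pvInv at h ⊢
  have hmem : ((k : Int), toilet_types[k]) ∈ PySem.List.enumerate toilet_types 0 := by
    exact (PySem.List.mem_enumerate_iff _ _ _).mpr ⟨k, hk, by simp⟩
  have hcon : d.contains (k : Int) = true := by
    rw [PySem.Dict.contains_iff_mem_keys]
    show (k : Int) ∈ d.items.map Prod.fst
    rw [h, List.map_map]
    exact List.mem_map.mpr ⟨_, hmem, rfl⟩
  rw [PySem.Dict.items_insert_of_contains _ _ hcon, h, List.map_map]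
  refine List.map_congr_left ?_
  intro p hp
  rcases ((PySem.List.mem_enumerate_iff _ _ _).mp hp) with ⟨j, hj, rfl⟩
  simp only [Function.comp, pvVal, Int.zero_add]
  by_cases hjk : j = k
  · subst hjk
    simp [PySem.Dict.getD_insert_self]
  · have hne : (j : Int) ≠ (k : Int) := by exact_mod_cast hjk
    simp [hne, PySem.Dict.getD_insert_of_ne _ _ _ hne]

theorem pvInv_step (toilet_types : List String) (d ov : PySem.Dict Int String)
    (e : List (String × String)) (h : pvInv toilet_types d ov) :
    pvInv toilet_types (pvAStep toilet_types d e) (pvBStep toilet_types ov e) := by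
  unfold pvAStep pvBStep pvParseId?
  cases hid : (PySem.Dict.mk e).get? "id" with
  | none => exact h
  | some s =>
    dsimp only
    cases hn : PySem.Int.ofStr? s with
    | none => exact h
    | some n =>
      dsimp only
      by_cases hr : 0 ≤ n - 1 ∧ n - 1 < (toilet_types.length : Int)
      · simp only [if_pos hr]
        obtain ⟨h0, h1⟩ := hr
        set cond := ((PySem.Dict.mk e).get? "condition").getD "Clean" with hcond
        have hk : (n - 1).toNat < toilet_types.length := by omega
        have hcast : ((n - 1).toNat : Int) = n - 1 := Int.toNat_of_nonneg h0
        have hget : PySem.List.pyGetD toilet_types (n - 1) "" = toilet_types[(n - 1).toNat] := by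
          conv_lhs => rw [← hcast]
          rw [PySem.List.pyGetD_natCast]
          exact List.getD_eq_getElem _ _ hk
        have := pvInv_insert toilet_types d ov (n - 1).toNat hk cond h
        rw [hcast] at this
        rw [hget]
        by_cases hne : (PySem.Str.lower toilet_types[(n - 1).toNat] == "nonexistent") = true
        · rw [if_pos hne] at this ⊢; exact this
        · rw [if_neg hne] at this ⊢; exact this
      · simp only [if_neg hr]; exact h

theorem pvInv_fold (toilet_types : List String) (es : List (List (String × String)))
    (d ov : PySem.Dict Int String) (h : pvInv toilet_types d ov) :
    pvInv toilet_types (es.foldl (pvAStep toilet_types) d) (es.foldl (pvBStep toilet_types) ov) := by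
  induction es generalizing d ov with
  | nil => exact h
  | cons e es ih => exact ih _ _ (pvInv_step _ _ _ _ h)

-- Option-valued reverse search: some cond at the first match, none if no match
def pvLatestO (i : Int) : List (List (String × String)) → Option String
  | [] => none
  | e :: rest =>
    match pvParseId? e with
    | none => pvLatestO i rest
    | some idx =>
      if idx == i then some (((PySem.Dict.mk e).get? "condition").getD "Clean")
      else pvLatestO i rest

theorem pvLatestCond_eq (i : Int) (l : List (List (String × String))) :
    pvLatestCond i l = (pvLatestO i l).getD "Clean" := by
  induction l with
  | nil => rfl
  | cons e rest ih =>
    unfold pvLatestCond pvLatestO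
    cases pvParseId? e with
    | none => exact ih
    | some idx =>
      dsimp only
      by_cases h : (idx == i) = true
      · rw [if_pos h, if_pos h]; rfl
      · rw [if_neg h, if_neg h]; exact ih

theorem pvLatestO_cons (i : Int) (e : List (String × String))
    (rest : List (List (String × String))) :
    pvLatestO i (e :: rest) =
      (match pvParseId? e with
       | none => pvLatestO i rest
       | some idx =>
         if idx == i then some (((PySem.Dict.mk e).get? "condition").getD "Clean")
         else pvLatestO i rest) := rfl

theorem pvLatestO_append (i : Int) (l l' : List (List (String × String))) :
    pvLatestO i (l ++ l') = (pvLatestO i l).orElse (fun _ => pvLatestO i l') := by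
  induction l with
  | nil => rfl
  | cons e rest ih =>
    rw [List.cons_append, pvLatestO_cons, pvLatestO_cons]
    cases pvParseId? e with
    | none => exact ih
    | some idx =>
      dsimp only
      by_cases h : (idx == i) = true
      · rw [if_pos h, if_pos h]; rfl
      · rw [if_neg h, if_neg h]; exact ih

-- the overrides dict read at an in-range index is the reverse-first-match over what was folded in
theorem pvGetD_fold (toilet_types : List String) (es : List (List (String × String)))
    (d : PySem.Dict Int String) (i : Int) (h0 : 0 ≤ i) (h1 : i < (toilet_types.length : Int)) :
    (es.foldl (pvBStep toilet_types) d).getD i "Clean" =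
      match pvLatestO i es.reverse with
      | some c => c
      | none => d.getD i "Clean" := by
  induction es generalizing d with
  | nil => rfl
  | cons e rest ih =>
    simp only [List.foldl_cons, List.reverse_cons]
    rw [ih, pvLatestO_append]
    cases hr : pvLatestO i rest.reverse with
    | some c => rfl
    | none =>
      simp only [Option.orElse]
      unfold pvBStep
      cases hp : pvParseId? e with
      | none => simp [pvLatestO, hp]
      | some idx =>
        simp only [pvLatestO, hp]
        by_cases hii : (idx == i) = true
        · have : idx = i := eq_of_beq hii
          subst this
          rw [if_pos hii, if_pos ⟨h0, h1⟩]
          simp [PySem.Dict.getD_insert_self]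
        · rw [if_neg hii]
          have hne : i ≠ idx := fun hc => hii (beq_iff_eq.mpr hc.symm)
          by_cases hb : 0 ≤ idx ∧ idx < (toilet_types.length : Int)
          · rw [if_pos hb]
            simp [PySem.Dict.getD_insert_of_ne _ _ _ hne]
          · rw [if_neg hb]

-- assemble: A's items for overrides ov = B's map using the reverse scan over es
theorem pvItems_eq (toilet_types : List String) (es : List (List (String × String)))
    (h : pvInv toilet_types
          ((es.foldl (pvAStep toilet_types) (pvEmptyConds toilet_types)))
          (es.foldl (pvBStep toilet_types) PySem.Dict.empty)) :
    (es.foldl (pvAStep toilet_types) (pvEmptyConds toilet_types)).items =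
      (PySem.List.enumerate toilet_types 0).map
        (fun p =>
          (p.1, if PySem.Str.lower p.2 == "nonexistent" then "Non-Existent"
                else pvLatestCond p.1 es.reverse)) := by
  rw [h]
  refine List.map_congr_left ?_
  intro p hp
  rcases ((PySem.List.mem_enumerate_iff _ _ _).mp hp) with ⟨j, hj, rfl⟩
  simp only [pvVal, Int.zero_add]
  by_cases hne : (PySem.Str.lower toilet_types[j] == "nonexistent") = true
  · rw [if_pos hne, if_pos hne]
  · rw [if_neg hne, if_neg hne]
    have h0 : (0 : Int) ≤ (j : Int) := Int.natCast_nonneg j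
    have h1 : (j : Int) < (toilet_types.length : Int) := by exact_mod_cast hj
    rw [pvGetD_fold toilet_types es PySem.Dict.empty (j : Int) h0 h1, pvLatestCond_eq]
    cases pvLatestO (j : Int) es.reverse with
    | some c => rfl
    | none => simp [PySem.Dict.getD, PySem.Dict.get?, PySem.Dict.empty]

-- ===== VERDICT (by name: the statement is the Claim_ definition above) =====
theorem conditions_from_frontend_payload_spec : Claim_equal_conditions_from_frontend_payload := by
  intro tts rc _
  show _ = _
  unfold conditions_from_frontend_payload conditions_from_frontend_payload_alt
  match rc with
  | none =>
    exact pvItems_eq tts [] (pvInv_base tts)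
  | some l =>
    by_cases hl : l = []
    · simp only [hl, if_pos]
      exact pvItems_eq tts [] (pvInv_base tts)
    · simp only [if_neg hl]
      have hA : (["stalls", "urinals"].foldl
            (fun out bucket =>
              (((PySem.Dict.mk l).get? bucket).getD []).foldl (pvAStep tts) out)
            (pvEmptyConds tts)) =
          ((((PySem.Dict.mk l).get? "stalls").getD []) ++ (((PySem.Dict.mk l).get? "urinals").getD [])).foldl
            (pvAStep tts) (pvEmptyConds tts) := by
        simp [List.foldl_append]
      have hE : (["stalls", "urinals"].foldl
            (fun es bucket => es ++ (((PySem.Dict.mk l).get? bucket).getD [])) ([] : List (List (String × String)))) =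
          (((PySem.Dict.mk l).get? "stalls").getD []) ++ (((PySem.Dict.mk l).get? "urinals").getD []) := by
        simp
      rw [hA, hE]
      refine pvItems_eq tts _ ?_
      have := pvInv_fold tts
        ((((PySem.Dict.mk l).get? "stalls").getD []) ++ (((PySem.Dict.mk l).get? "urinals").getD []))
        (pvEmptyConds tts) PySem.Dict.empty (pvInv_base tts)
      exact this
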